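-- pv_equiv track=rewrite | github.com/rabisnath/CAAP-CS | Exercises/Ch 7/number4.py | classify_student
-- ===== SOURCE A (Python) =====
-- credit_levels = {
-- 	"Freshman": 7,
-- 	"Sophomore": 16,
-- 	"Junior": 26,
-- }
--
-- def classify_student(credits):
-- 	classification = ""
--
-- 	for level in credit_levels:
-- 		if credits < credit_levels[level]:
-- 			classification = level
-- 			break
--
-- 	if classification == "":
-- 		classification = "Senior"
--
-- 	return classification
-- ===== SOURCE B (Python) =====
-- import bisect
--
-- _cutoffs = [7, 16, 26]
-- _labels = ["Freshman", "Sophomore", "Junior", "Senior"]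
--
-- def classify_student(credits):
--     return _labels[bisect.bisect_right(_cutoffs, credits)]
-- ===== Notes on version B (the rewrite author's own statement) =====
-- stated objective: idiomatic
-- what changed: Replaced the first-match scan over a dict with an empty-string sentinel by a bisect_right binary-search index into a sorted cutoff table paired with a label list.
import Mathlib
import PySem

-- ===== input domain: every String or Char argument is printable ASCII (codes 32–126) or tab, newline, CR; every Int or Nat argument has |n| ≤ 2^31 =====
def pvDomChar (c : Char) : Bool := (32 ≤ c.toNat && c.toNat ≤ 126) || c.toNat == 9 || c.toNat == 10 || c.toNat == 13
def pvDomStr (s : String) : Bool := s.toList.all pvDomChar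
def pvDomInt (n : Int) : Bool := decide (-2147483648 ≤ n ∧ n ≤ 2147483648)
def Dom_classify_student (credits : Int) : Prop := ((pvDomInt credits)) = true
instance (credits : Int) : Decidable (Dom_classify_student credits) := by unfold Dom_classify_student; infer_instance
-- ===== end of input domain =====

-- B replaces A's first-match scan over the dict (empty-string sentinel, break) by a
-- bisect_right table lookup into sorted cutoffs paired with labels; same values, more idiomatic.

-- ===== PORT A =====
def credit_levels : PySem.Dict String Int :=
  PySem.Dict.ofList [("Freshman", 7), ("Sophomore", 16), ("Junior", 26)]

-- the for-loop with break: scan the keys, stop at the first level with credits < value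
def classifyLoop (credits : Int) : List String → String
  | [] => ""
  | level :: rest =>
      if credits < PySem.Dict.getD credit_levels level 0 then level
      else classifyLoop credits rest

def classify_student (credits : Int) : String :=
  let classification := classifyLoop credits (PySem.Dict.keys credit_levels)
  if classification == "" then "Senior" else classification

-- ===== PORT B =====
def cutoffs : List Int := [7, 16, 26]
def labels : List String := ["Freshman", "Sophomore", "Junior", "Senior"]

def classify_student_alt (credits : Int) : String :=
  PySem.List.pyGetD labels (Int.ofNat (PySem.List.bisectRight cutoffs credits)) ""

-- ===== PRECONDITION & SPEC =====
def Spec_classify_student (credits : Int) (out : String) : Prop := out = classify_student_alt credits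
instance (credits : Int) (out : String) : Decidable (Spec_classify_student credits out) := by unfold Spec_classify_student; infer_instance

-- ===== CLAIM (what is proved, stated in full; the proofs are below) =====
def Claim_equal_classify_student : Prop := ∀ (credits : Int), Dom_classify_student credits → Spec_classify_student credits (classify_student credits)

-- ===== LEMMAS AND PROOFS =====

theorem bisect_cutoffs (credits : Int) :
    PySem.List.bisectRight cutoffs credits =
      (if credits < 7 then 0 else if credits < 16 then 1 else if credits < 26 then 2 else 3) := by
  have hs : List.Pairwise (· ≤ ·) cutoffs := by decide
  obtain ⟨hle, hlo, hhi⟩ := PySem.List.bisectRight_spec cutoffs credits hs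
  have hlen : cutoffs.length = 3 := by decide
  have g0 := hlo 0 (by omega)
  have g1 := hlo 1 (by omega)
  have g2 := hlo 2 (by omega)
  have u0 := hhi 0 (by omega)
  have u1 := hhi 1 (by omega)
  have u2 := hhi 2 (by omega)
  simp only [cutoffs, List.getElem_cons_zero, List.getElem_cons_succ] at g0 g1 g2 u0 u1 u2
  rw [hlen] at hle
  simp only [cutoffs] at hle ⊢
  set n := PySem.List.bisectRight [(7:Int), 16, 26] credits with hn
  have e : n = 0 ∨ n = 1 ∨ n = 2 ∨ n = 3 := by omega
  rcases e with e | e | e | e <;> rw [e] at g0 g1 g2 u0 u1 u2 <;> split_ifs with h1 h2 h3 <;> omega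

-- ===== VERDICT (by name: the statement is the Claim_ definition above) =====
theorem classify_student_spec : Claim_equal_classify_student := by
  intro credits _
  unfold Spec_classify_student
  have hk : PySem.Dict.keys credit_levels = ["Freshman", "Sophomore", "Junior"] := by decide
  have hF : PySem.Dict.getD credit_levels "Freshman" 0 = 7 := by decide
  have hS : PySem.Dict.getD credit_levels "Sophomore" 0 = 16 := by decide
  have hJ : PySem.Dict.getD credit_levels "Junior" 0 = 26 := by decide
  simp only [classify_student, classify_student_alt, bisect_cutoffs, hk, classifyLoop, hF, hS, hJ]
  by_cases h1 : credits < 7 <;> by_cases h2 : credits < 16 <;> by_cases h3 : credits < 26 <;>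
    simp [h1, h2, h3, labels, PySem.List.pyGetD, PySem.List.pyGet?, PySem.List.pyIdx?]
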